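-- pv_equiv track=rewrite | github.com/Hoegh07/Project-Euler | Euler759/Euler759.py | Sbn2
-- ===== SOURCE A (Python) =====
-- MOD = 1000000007
--
-- def f(n):
--     b = 0
--     y = str(bin(n)[2:])
--     for j in range(0,len(y)):
--         if(y[j] == '1'):
--             b += 1
--     return b*n
--
-- def T(n):
--     return ((n*(n+1))//2)
--
-- memo_Sb = {}
--
-- def Sb(n):
--     if(n in memo_Sb):
--         return memo_Sb[n]
--     if(n == 0):
--         return 0
--     if(n%2 == 0):
--         c = (Sb(n//2)+Sb(n//2-1)+n//2)%MOD
--         memo_Sb[n] = c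
--         return c
--     c = (2*Sb(n//2)+n//2+1)%MOD
--     memo_Sb[n] = c
--     return c
--
-- memo_S1 = {}
--
-- def S1(n):
--     if(n in memo_S1):
--         return memo_S1[n]
--     if(n == 0):
--         return 0
--     if(n == 1):
--         return 1
--     if(n%2 == 0):
--         c = (f(1)+f(n)+4*S1(n//2-1)+Sb(n//2-1)+2*T(n//2-1)+(n//2-1))%MOD
--         memo_S1[n] = c
--         return c
--     c = (f(1)+4*S1(n//2)+Sb(n//2)+2*T(n//2)+(n//2))%MOD
--     memo_S1[n] = c
--     return c
--
-- def b(n):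
--     y = str(bin(n)[2:])
--     res = 0
--     for i in range(0,len(y)):
--         if(y[i] == '1'):
--             res += 1
--     return res
--
-- def sos(n):
--     return (n*(n+1)*(2*n+1))//6
--
-- memo_Sbn2 = {}
--
-- def Sbn2(n):
--     if(n in memo_Sbn2):
--         return memo_Sbn2[n]
--     if(n == 0):
--         return 0
--     if(n == 1):
--         return 1
--     if(n%2 == 0):
--         c = (1+b(n)*n**2+8*Sbn2(n//2-1)+4*S1(n//2-1)+Sb(n//2-1)+(n//2-1)+4*T(n//2-1)+4*sos(n//2-1))%MOD
--         memo_Sbn2[n] = c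
--         return c
--     c = (1+8*Sbn2(n//2)+4*S1(n//2)+Sb(n//2)+(n//2)+4*T(n//2)+4*sos(n//2))%MOD
--     memo_Sbn2[n] = c
--     return c
-- ===== SOURCE B (Python) =====
-- def Sbn2(n):
--     MOD = 1000000007
--     if n == 0:
--         return 0
--
--     def bits(m):
--         return bin(m).count("1")
--
--     def tri(m):
--         return m * (m + 1) // 2
--
--     def sos(m):
--         return m * (m + 1) * (2 * m + 1) // 6
--
--     def g(m):
--         # returns (Sb(m), Sb(m-1), S1(m), S1(m-1), Sbn2(m), Sbn2(m-1))
--         if m == 1: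
--             return (1, 0, 1, 0, 1, 0)
--         k = m // 2
--         sbk, sbk1, s1k, s1k1, q2k, q2k1 = g(k)
--         if m % 2 == 0:
--             # m = 2k, m-1 = 2k-1 (odd, half = k-1)
--             sb = (sbk + sbk1 + k) % MOD
--             sb1 = (2 * sbk1 + (k - 1) + 1) % MOD
--             s1 = (1 + bits(m) * m + 4 * s1k1 + sbk1 + 2 * tri(k - 1) + (k - 1)) % MOD
--             s11 = (1 + 4 * s1k1 + sbk1 + 2 * tri(k - 1) + (k - 1)) % MOD
--             q = (1 + bits(m) * m * m + 8 * q2k1 + 4 * s1k1 + sbk1 + (k - 1)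
--                  + 4 * tri(k - 1) + 4 * sos(k - 1)) % MOD
--             q1 = (1 + 8 * q2k1 + 4 * s1k1 + sbk1 + (k - 1)
--                   + 4 * tri(k - 1) + 4 * sos(k - 1)) % MOD
--         else:
--             # m = 2k+1, m-1 = 2k (even, halves k and k-1)
--             e = m - 1
--             sb = (2 * sbk + k + 1) % MOD
--             sb1 = (sbk + sbk1 + k) % MOD
--             s1 = (1 + 4 * s1k + sbk + 2 * tri(k) + k) % MOD
--             s11 = (1 + bits(e) * e + 4 * s1k1 + sbk1 + 2 * tri(k - 1) + (k - 1)) % MOD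
--             q = (1 + 8 * q2k + 4 * s1k + sbk + k + 4 * tri(k) + 4 * sos(k)) % MOD
--             q1 = (1 + bits(e) * e * e + 8 * q2k1 + 4 * s1k1 + sbk1 + (k - 1)
--                   + 4 * tri(k - 1) + 4 * sos(k - 1)) % MOD
--         return (sb, sb1, s1, s11, q, q1)
--
--     return g(n)[4]
-- ===== Notes on version B (the rewrite author's own statement) =====
-- stated objective: alternative
-- what changed: Replaces the three interdependent memoized top-down recursions (Sb, S1, Sbn2 with global dicts) by a single unmemoized recursion g(m) returning the six-tuple of values at m and m-1, so each level needs exactly one recursive call g(m//2) and no memo tables; Pre_ excludes negative n, on which A recurses forever (RecursionError).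
import Mathlib
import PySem

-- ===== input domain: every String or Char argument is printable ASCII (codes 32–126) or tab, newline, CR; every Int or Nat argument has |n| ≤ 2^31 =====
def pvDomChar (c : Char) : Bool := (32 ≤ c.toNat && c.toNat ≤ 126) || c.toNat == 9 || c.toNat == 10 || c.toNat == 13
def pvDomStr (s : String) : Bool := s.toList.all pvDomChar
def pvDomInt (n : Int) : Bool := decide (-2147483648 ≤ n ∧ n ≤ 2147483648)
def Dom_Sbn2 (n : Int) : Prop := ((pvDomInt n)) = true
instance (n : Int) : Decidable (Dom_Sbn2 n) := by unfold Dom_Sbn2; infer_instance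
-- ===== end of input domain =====

-- B replaces A's three interdependent memoized top-down recursions by one unmemoized
-- recursion returning the six-tuple of values at m and m-1 (one recursive call per level);
-- objective: alternative decomposition, same asymptotic cost.

-- ===== PORT A =====
def pyMOD : Int := 1000000007

-- bin(n)[2:] as its list of characters (most significant bit first); empty for n = 0
def binChars : Nat → List Char
  | n =>
    if n = 0 then []
    else binChars (n / 2) ++ [if n % 2 = 1 then '1' else '0']
  decreasing_by omega

-- Python b(n) / f(n)'s loop: count the '1' characters of bin(n)[2:] (bin(0) gives "0")
def bA (n : Nat) : Int :=
  (if n = 0 then ['0'] else binChars n).foldl (fun acc c => if c = '1' then acc + 1 else acc) 0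

def fA (n : Nat) : Int := bA n * (n : Int)

-- n*(n+1)//2 : the product is even, so truncating and flooring division agree (exact here)
def TA (n : Int) : Int := (n * (n + 1)) / 2

-- Python floor-division here is exact: the product is always divisible by the divisor
def sosA (n : Int) : Int := (n * (n + 1) * (2 * n + 1)) / 6

def SbN : Nat → Int
  | n =>
    if n = 0 then 0
    else if n % 2 = 0 then (SbN (n / 2) + SbN (n / 2 - 1) + ((n / 2 : Nat) : Int)) % pyMOD
    else (2 * SbN (n / 2) + ((n / 2 : Nat) : Int) + 1) % pyMOD
  decreasing_by all_goals omega

def S1N : Nat → Int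
  | n =>
    if n = 0 then 0
    else if n = 1 then 1
    else if n % 2 = 0 then
      (fA 1 + fA n + 4 * S1N (n / 2 - 1) + SbN (n / 2 - 1) +
        2 * TA ((n / 2 - 1 : Nat) : Int) + ((n / 2 - 1 : Nat) : Int)) % pyMOD
    else
      (fA 1 + 4 * S1N (n / 2) + SbN (n / 2) +
        2 * TA ((n / 2 : Nat) : Int) + ((n / 2 : Nat) : Int)) % pyMOD
  decreasing_by all_goals omega

def Sbn2N : Nat → Int
  | n =>
    if n = 0 then 0
    else if n = 1 then 1
    else if n % 2 = 0 then
      (1 + bA n * (n : Int) ^ 2 + 8 * Sbn2N (n / 2 - 1) + 4 * S1N (n / 2 - 1) +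
        SbN (n / 2 - 1) + ((n / 2 - 1 : Nat) : Int) +
        4 * TA ((n / 2 - 1 : Nat) : Int) + 4 * sosA ((n / 2 - 1 : Nat) : Int)) % pyMOD
    else
      (1 + 8 * Sbn2N (n / 2) + 4 * S1N (n / 2) + SbN (n / 2) + ((n / 2 : Nat) : Int) +
        4 * TA ((n / 2 : Nat) : Int) + 4 * sosA ((n / 2 : Nat) : Int)) % pyMOD
  decreasing_by all_goals omega

def Sbn2 (n : Int) : Int := Sbn2N n.toNat

-- ===== PORT B =====
-- bin(m).count('1') ported as the corresponding popcount recursion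
def bB : Nat → Int
  | m => if m = 0 then 0 else bB (m / 2) + ((m % 2 : Nat) : Int)
  decreasing_by omega

def triB (m : Int) : Int := (m * (m + 1)) / 2

def sosB (m : Int) : Int := (m * (m + 1) * (2 * m + 1)) / 6

-- g(m) = (Sb(m), Sb(m-1), S1(m), S1(m-1), Sbn2(m), Sbn2(m-1)); only reached with m ≥ 1
def gN : Nat → Int × Int × Int × Int × Int × Int
  | m =>
    if m ≤ 1 then (1, 0, 1, 0, 1, 0)
    else
      let r := gN (m / 2)
      let sbk := r.1
      let sbk1 := r.2.1
      let s1k := r.2.2.1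
      let s1k1 := r.2.2.2.1
      let q2k := r.2.2.2.2.1
      let q2k1 := r.2.2.2.2.2
      let ki : Int := ((m / 2 : Nat) : Int)
      if m % 2 = 0 then
        ((sbk + sbk1 + ki) % pyMOD,
         (2 * sbk1 + (ki - 1) + 1) % pyMOD,
         (1 + bB m * (m : Int) + 4 * s1k1 + sbk1 + 2 * triB (ki - 1) + (ki - 1)) % pyMOD,
         (1 + 4 * s1k1 + sbk1 + 2 * triB (ki - 1) + (ki - 1)) % pyMOD,
         (1 + bB m * (m : Int) * (m : Int) + 8 * q2k1 + 4 * s1k1 + sbk1 + (ki - 1) +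
           4 * triB (ki - 1) + 4 * sosB (ki - 1)) % pyMOD,
         (1 + 8 * q2k1 + 4 * s1k1 + sbk1 + (ki - 1) +
           4 * triB (ki - 1) + 4 * sosB (ki - 1)) % pyMOD)
      else
        let e : Int := (m : Int) - 1
        ((2 * sbk + ki + 1) % pyMOD,
         (sbk + sbk1 + ki) % pyMOD,
         (1 + 4 * s1k + sbk + 2 * triB ki + ki) % pyMOD,
         (1 + bB (m - 1) * e + 4 * s1k1 + sbk1 + 2 * triB (ki - 1) + (ki - 1)) % pyMOD,
         (1 + 8 * q2k + 4 * s1k + sbk + ki + 4 * triB ki + 4 * sosB ki) % pyMOD,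
         (1 + bB (m - 1) * e * e + 8 * q2k1 + 4 * s1k1 + sbk1 + (ki - 1) +
           4 * triB (ki - 1) + 4 * sosB (ki - 1)) % pyMOD)
  decreasing_by omega

def Sbn2_alt (n : Int) : Int :=
  if n = 0 then 0 else (gN n.toNat).2.2.2.2.1

-- ===== PRECONDITION & SPEC =====
-- Pre_ excludes negative n, on which A recurses forever (RecursionError).
def Pre_Sbn2 (n : Int) : Prop := 0 ≤ n
instance (n : Int) : Decidable (Pre_Sbn2 n) := by unfold Pre_Sbn2; infer_instance
def pvWitness_Sbn2 : Int := (10)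

def Spec_Sbn2 (n : Int) (out : Int) : Prop := out = Sbn2_alt n
instance (n : Int) (out : Int) : Decidable (Spec_Sbn2 n out) := by unfold Spec_Sbn2; infer_instance

-- ===== CLAIM (what is proved, stated in full; the proofs are below) =====
def Claim_equal_Sbn2 : Prop := ∀ (n : Int), Dom_Sbn2 n → Pre_Sbn2 n → Spec_Sbn2 n (Sbn2 n)

-- ===== LEMMAS AND PROOFS =====

theorem binChars_foldl : ∀ n : Nat, ∀ acc : Int,
    (binChars n).foldl (fun acc c => if c = '1' then acc + 1 else acc) acc = acc + bB n := by
  intro n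
  induction n using Nat.strong_induction_on with
  | _ n ih =>
    intro acc
    by_cases h0 : n = 0
    · subst h0
      rw [binChars, bB]
      simp
    · rw [binChars, bB, if_neg h0, if_neg h0, List.foldl_append,
        ih (n / 2) (by omega) acc]
      by_cases hp : n % 2 = 1
      · simp [hp]; ring
      · have h2 : n % 2 = 0 := by omega
        simp [h2]

theorem bB_eq_bA : ∀ n : Nat, bA n = bB n := by
  intro n
  unfold bA
  by_cases h0 : n = 0
  · subst h0
    rw [bB]
    simp
  · rw [if_neg h0, binChars_foldl n 0]
    ring

theorem binChars_zero : binChars 0 = [] := by rw [binChars]; simp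

theorem binChars_one : binChars 1 = ['1'] := by
  rw [binChars]
  norm_num [binChars_zero]

theorem fA_one : fA 1 = 1 := by simp [fA, bA, binChars_one]

theorem SbN_zero : SbN 0 = 0 := by rw [SbN]; simp

theorem S1N_zero : S1N 0 = 0 := by rw [S1N]; simp

theorem Sbn2N_zero : Sbn2N 0 = 0 := by rw [Sbn2N]; simp

theorem castsub (k : Nat) (hk : 1 ≤ k) : ((k - 1 : Nat) : Int) = (k : Int) - 1 := by omega

theorem SbN_even (k : Nat) (hk : 1 ≤ k) :
    SbN (2 * k) = (SbN k + SbN (k - 1) + (k : Int)) % pyMOD := by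
  rw [SbN]
  have h0 : ¬(2 * k = 0) := by omega
  have hd : 2 * k / 2 = k := by omega
  have hm : 2 * k % 2 = 0 := by omega
  simp [h0, hd, hm]

theorem SbN_odd (k : Nat) :
    SbN (2 * k + 1) = (2 * SbN k + (k : Int) + 1) % pyMOD := by
  rw [SbN]
  have hd : (2 * k + 1) / 2 = k := by omega
  simp [hd]

theorem S1N_even (k : Nat) (hk : 1 ≤ k) :
    S1N (2 * k) = (fA 1 + fA (2 * k) + 4 * S1N (k - 1) + SbN (k - 1) +
      2 * TA ((k : Int) - 1) + ((k : Int) - 1)) % pyMOD := by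
  rw [S1N]
  have h0 : ¬(2 * k = 0) := by omega
  have h1 : ¬(2 * k = 1) := by omega
  have hd : 2 * k / 2 = k := by omega
  have hm : 2 * k % 2 = 0 := by omega
  simp [h0, h1, hd, hm, castsub k hk]

theorem S1N_odd (k : Nat) :
    S1N (2 * k + 1) = (fA 1 + 4 * S1N k + SbN k +
      2 * TA (k : Int) + (k : Int)) % pyMOD := by
  by_cases hk : k = 0
  · subst hk
    rw [S1N]
    norm_num [S1N_zero, SbN_zero, fA_one, TA, pyMOD]
  · rw [S1N]
    have hd : (2 * k + 1) / 2 = k := by omega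
    simp [hd, hk]

theorem Sbn2N_even (k : Nat) (hk : 1 ≤ k) :
    Sbn2N (2 * k) = (1 + bA (2 * k) * ((2 * k : Nat) : Int) ^ 2 + 8 * Sbn2N (k - 1) +
      4 * S1N (k - 1) + SbN (k - 1) + ((k : Int) - 1) +
      4 * TA ((k : Int) - 1) + 4 * sosA ((k : Int) - 1)) % pyMOD := by
  rw [Sbn2N]
  have h0 : ¬(2 * k = 0) := by omega
  have h1 : ¬(2 * k = 1) := by omega
  have hd : 2 * k / 2 = k := by omega
  have hm : 2 * k % 2 = 0 := by omega
  simp [h0, h1, hd, hm, castsub k hk]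

theorem Sbn2N_odd (k : Nat) :
    Sbn2N (2 * k + 1) = (1 + 8 * Sbn2N k + 4 * S1N k + SbN k + (k : Int) +
      4 * TA (k : Int) + 4 * sosA (k : Int)) % pyMOD := by
  by_cases hk : k = 0
  · subst hk
    rw [Sbn2N]
    norm_num [Sbn2N_zero, S1N_zero, SbN_zero, TA, sosA, pyMOD]
  · rw [Sbn2N]
    have hd : (2 * k + 1) / 2 = k := by omega
    simp [hd, hk]

theorem triB_eq (x : Int) : triB x = TA x := rfl

theorem sosB_eq (x : Int) : sosB x = sosA x := rfl

theorem g_correct : ∀ m : Nat, 1 ≤ m →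
    gN m = (SbN m, SbN (m - 1), S1N m, S1N (m - 1), Sbn2N m, Sbn2N (m - 1)) := by
  intro m
  induction m using Nat.strong_induction_on with
  | _ m ih =>
    intro hm
    by_cases h1 : m = 1
    · subst h1
      rw [gN]
      norm_num
      refine ⟨?_, SbN_zero.symm, ?_, S1N_zero.symm, ?_, Sbn2N_zero.symm⟩
      · rw [show (1 : Nat) = 2 * 0 + 1 from rfl, SbN_odd]
        norm_num [SbN_zero, pyMOD]
      · rw [S1N]; simp
      · rw [Sbn2N]; simp
    · have hm2 : 2 ≤ m := by omega
      have hk1 : 1 ≤ m / 2 := by omega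
      have ihk := ih (m / 2) (by omega) hk1
      by_cases hp : m % 2 = 0
      · obtain ⟨k, rfl⟩ : ∃ k, m = 2 * k := ⟨m / 2, by omega⟩
        have hd : 2 * k / 2 = k := by omega
        rw [hd] at ihk hk1
        rw [gN]
        have hle : ¬(2 * k ≤ 1) := by omega
        rw [if_neg hle, if_pos hp]
        simp only [ihk, hd]
        have hsub : 2 * k - 1 = 2 * (k - 1) + 1 := by omega
        have hcast : ((k - 1 : Nat) : Int) = (k : Int) - 1 := by omega
        rw [hsub, SbN_even k hk1, SbN_odd (k - 1), S1N_even k hk1, S1N_odd (k - 1),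
          Sbn2N_even k hk1, Sbn2N_odd (k - 1), hcast, fA_one]
        simp only [Prod.mk.injEq, fA, bB_eq_bA, triB_eq, sosB_eq]
        and_intros <;> (first | trivial | (congr 1; push_cast; ring))
      · obtain ⟨k, rfl⟩ : ∃ k, m = 2 * k + 1 := ⟨m / 2, by omega⟩
        have hd : (2 * k + 1) / 2 = k := by omega
        rw [hd] at ihk hk1
        rw [gN]
        have hle : ¬(2 * k + 1 ≤ 1) := by omega
        rw [if_neg hle, if_neg hp]
        simp only [ihk, hd]
        have hsub : 2 * k + 1 - 1 = 2 * k := by omega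
        rw [hsub, SbN_odd k, SbN_even k hk1, S1N_odd k, S1N_even k hk1,
          Sbn2N_odd k, Sbn2N_even k hk1, fA_one]
        simp only [Prod.mk.injEq, fA, bB_eq_bA, triB_eq, sosB_eq]
        and_intros <;> (first | trivial | (congr 1; push_cast; ring))

-- ===== VERDICT (by name: the statement is the Claim_ definition above) =====
theorem Sbn2_spec : Claim_equal_Sbn2 := by
  intro n _ hpre
  unfold Spec_Sbn2 Sbn2 Sbn2_alt
  by_cases h0 : n = 0
  · subst h0
    simp
    rw [Sbn2N]
    simp
  · have hm : 1 ≤ n.toNat := by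
      unfold Pre_Sbn2 at hpre; omega
    rw [if_neg h0, g_correct n.toNat hm]
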